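-- pv_equiv track=rewrite | github.com/kohr2/code-grapher | agents/git_diff_agent.py | _extract_file_diff
-- ===== SOURCE A (Python) =====
-- def _extract_file_diff(diff_text: str, file_path: str) -> str:
--     """Extract the diff section for a specific file"""
--     lines = diff_text.split('\n')
--     file_diff_lines = []
--     in_file_diff = False
--
--     for line in lines:
--         if line.startswith('diff --git') and file_path in line:
--             in_file_diff = True
--             file_diff_lines = [line]
--         elif in_file_diff:
--             if line.startswith('diff --git'):
--                 break  # Start of next file
--             file_diff_lines.append(line)
--
--     return '\n'.join(file_diff_lines)
-- ===== SOURCE B (Python) =====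
-- def _extract_file_diff(diff_text: str, file_path: str) -> str:
--     """Extract the diff section for a specific file (index-then-slice)."""
--     lines = diff_text.split('\n')
--     headers = [i for i, l in enumerate(lines) if l.startswith('diff --git')]
--     start = None
--     end = len(lines)
--     for i in headers:
--         if file_path in lines[i]:
--             start = i
--         elif start is not None:
--             end = i
--             break
--     if start is None:
--         return ''
--     return '\n'.join(lines[start:end])
-- ===== Notes on version B (the rewrite author's own statement) =====
-- stated objective: alternative
-- what changed: A's single stateful streaming pass (accumulate lines, reset on each matching header, break on a non-matching one) is replaced by an index-then-slice decomposition: collect all 'diff --git' header line indices, scan only that index list to pick the section's start and end, then slice and join lines[start:end].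
import Mathlib
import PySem

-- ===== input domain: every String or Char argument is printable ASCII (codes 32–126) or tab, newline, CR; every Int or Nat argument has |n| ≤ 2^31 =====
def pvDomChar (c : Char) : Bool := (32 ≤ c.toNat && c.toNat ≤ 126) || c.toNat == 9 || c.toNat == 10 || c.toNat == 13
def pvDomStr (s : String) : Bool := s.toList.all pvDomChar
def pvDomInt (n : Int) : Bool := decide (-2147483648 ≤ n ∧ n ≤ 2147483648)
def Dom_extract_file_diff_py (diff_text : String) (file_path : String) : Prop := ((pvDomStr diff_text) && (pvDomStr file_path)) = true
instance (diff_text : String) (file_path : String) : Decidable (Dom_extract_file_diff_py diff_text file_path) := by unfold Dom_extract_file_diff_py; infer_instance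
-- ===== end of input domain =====

-- B replaces A's single stateful streaming pass by an index-then-slice decomposition
-- (collect header indices, pick start/end, slice); same result, no speed claim.

-- ===== PORT A =====
-- literal port of A's loop: state = (accumulated section lines, in_file_diff flag); break = return acc
def pvA_loop (fp : String) : List String → List String → Bool → List String
  | [], acc, _ => acc
  | line :: rest, acc, inf =>
    if PySem.Str.startswith line "diff --git" && PySem.Str.isIn fp line then
      pvA_loop fp rest [line] true
    else if inf then
      if PySem.Str.startswith line "diff --git" then acc   -- break: start of next file
      else pvA_loop fp rest (acc ++ [line]) inf
    else pvA_loop fp rest acc inf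

def extract_file_diff_py (diff_text : String) (file_path : String) : String :=
  PySem.Str.join "\n" (pvA_loop file_path (((PySem.Str.split? diff_text "\n").getD [])) [] false)

-- ===== PORT B =====
-- headers = [i for i, l in enumerate(lines) if l.startswith('diff --git')]
def pvB_headers (lines : List String) : List Int :=
  ((PySem.List.enumerate lines 0).filter (fun p => PySem.Str.startswith p.2 "diff --git")).map (·.1)

-- the for-loop over header indices; returns (start, end); early return models the break.
-- lines[i] is read with pyGetD: every i comes from enumerate, hence is in range, so this is exact.
def pvB_scan (fp : String) (lines : List String) : List Int → Option Int → Int → Option Int × Int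
  | [], s, e => (s, e)
  | i :: rest, s, e =>
    if PySem.Str.isIn fp (PySem.List.pyGetD lines i "") then pvB_scan fp lines rest (some i) e
    else match s with
      | some _ => (s, i)        -- end = i; break
      | none => pvB_scan fp lines rest none e

def extract_file_diff_py_alt (diff_text : String) (file_path : String) : String :=
  let lines := ((PySem.Str.split? diff_text "\n").getD [])
  let r := pvB_scan file_path lines (pvB_headers lines) none (lines.length : Int)
  match r.1 with
  | none => ""
  | some s => PySem.Str.join "\n" (PySem.List.slice lines (some s) (some r.2))

-- ===== PRECONDITION & SPEC =====
def Spec_extract_file_diff_py (diff_text : String) (file_path : String) (out : String) : Prop := out = extract_file_diff_py_alt diff_text file_path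
instance (diff_text : String) (file_path : String) (out : String) : Decidable (Spec_extract_file_diff_py diff_text file_path out) := by unfold Spec_extract_file_diff_py; infer_instance

-- ===== CLAIM (what is proved, stated in full; the proofs are below) =====
def Claim_equal_extract_file_diff_py : Prop := ∀ (diff_text : String) (file_path : String), Dom_extract_file_diff_py diff_text file_path → Spec_extract_file_diff_py diff_text file_path (extract_file_diff_py diff_text file_path)

-- ===== LEMMAS AND PROOFS =====

-- header indices of `lines` when its first element sits at absolute index k
def pvHdrIdx (k : Int) (lines : List String) : List Int :=
  ((PySem.List.enumerate lines k).filter (fun p => PySem.Str.startswith p.2 "diff --git")).map (·.1)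

lemma pvB_headers_eq (lines : List String) : pvB_headers lines = pvHdrIdx 0 lines := rfl

lemma pvHdrIdx_nil (k : Int) : pvHdrIdx k [] = [] := rfl

lemma pvHdrIdx_cons (k : Int) (l : String) (rest : List String) :
    pvHdrIdx k (l :: rest)
      = (if PySem.Str.startswith l "diff --git" then [k] else []) ++ pvHdrIdx (k + 1) rest := by
  simp [pvHdrIdx, PySem.List.enumerate_cons, List.filter_cons]
  split <;> simp

lemma pvGetD_append_length (A : List String) (x : String) (rs : List String) (d : String) :
    (A ++ x :: rs).getD A.length d = x := by
  simp [List.getD]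

-- result of the section read off B's (start, end): [] when no match, lines[s:e] otherwise
def pvOut (lines : List String) (r : Option Int × Int) : List String :=
  match r.1 with
  | none => []
  | some s => PySem.List.slice lines (some s) (some r.2)

lemma pvSlice_mid (P seg tl : List String) :
    PySem.List.slice (P ++ seg ++ tl) (some ((P.length : Nat) : Int))
      (some ((P.length + seg.length : Nat) : Int)) = seg := by
  rw [PySem.List.slice_natCast, List.append_assoc, List.drop_left]
  have h : P.length + seg.length - P.length = seg.length := by omega
  rw [h, List.take_left]

lemma pvSlice_end (P tl : List String) :
    PySem.List.slice (P ++ tl) (some ((P.length : Nat) : Int))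
      (some (((P ++ tl).length : Nat) : Int)) = tl := by
  rw [PySem.List.slice_natCast, List.drop_left, List.length_append]
  have h : P.length + tl.length - P.length = tl.length := by omega
  rw [h, List.take_length]

-- phase 2: a matching header was seen; seg = section collected so far, P = everything before it
lemma pvL2 (fp : String) : ∀ (rest P seg : List String), seg ≠ [] →
    pvOut (P ++ seg ++ rest)
      (pvB_scan fp (P ++ seg ++ rest)
        (pvHdrIdx ((P.length + seg.length : Nat) : Int) rest)
        (some (P.length : Int)) (((P ++ seg ++ rest).length : Nat) : Int))
    = pvA_loop fp rest seg true := by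
  intro rest
  induction rest with
  | nil =>
    intro P seg hseg
    simp only [pvHdrIdx_nil, pvB_scan, pvOut, List.append_nil]
    exact pvSlice_end P seg
  | cons x rs ih =>
    intro P seg hseg
    rw [pvHdrIdx_cons]
    by_cases hh : PySem.Str.startswith x "diff --git"
    · have hget : PySem.List.pyGetD (P ++ seg ++ x :: rs) ((P.length + seg.length : Nat) : Int) ""
          = x := by
        rw [PySem.List.pyGetD_natCast, ← List.length_append]
        exact pvGetD_append_length (P ++ seg) x rs ""
      simp only [hh, if_true, List.singleton_append, pvB_scan, hget]
      by_cases hin : PySem.Str.isIn fp x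
      · simp only [hin, if_true]
        have h2 := ih (P ++ seg) [x] (by simp)
        simp only [pvA_loop, hh, hin, Bool.and_self, if_true]
        simp only [List.append_assoc, List.singleton_append, List.length_append,
          List.length_singleton] at h2 ⊢
        push_cast at h2 ⊢
        exact h2
      · simp only [hin, if_false, Bool.false_eq_true]
        simp only [pvOut]
        have hs := pvSlice_mid P seg (x :: rs)
        simp only [List.append_assoc] at hs ⊢
        rw [hs]
        simp only [pvA_loop, hh, hin, Bool.and_false, Bool.false_eq_true, if_false, if_true]
    · simp only [hh, if_false, Bool.false_eq_true, List.nil_append]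
      have h2 := ih P (seg ++ [x]) (by simp)
      simp only [pvA_loop, hh, Bool.false_and, Bool.false_eq_true, if_false]
      simp only [List.append_assoc, List.singleton_append, List.length_append,
        List.length_singleton] at h2 ⊢
      push_cast at h2 ⊢
      exact h2

-- phase 1: no match yet (start = none); P = lines already passed, none of which matched
lemma pvL1 (fp : String) : ∀ (rest P : List String),
    pvOut (P ++ rest)
      (pvB_scan fp (P ++ rest) (pvHdrIdx ((P.length : Nat) : Int) rest) none
        (((P ++ rest).length : Nat) : Int))
    = pvA_loop fp rest [] false := by
  intro rest
  induction rest with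
  | nil => intro P; simp [pvHdrIdx_nil, pvB_scan, pvOut, pvA_loop]
  | cons x rs ih =>
    intro P
    rw [pvHdrIdx_cons]
    by_cases hh : PySem.Str.startswith x "diff --git"
    · have hget : PySem.List.pyGetD (P ++ x :: rs) ((P.length : Nat) : Int) "" = x := by
        rw [PySem.List.pyGetD_natCast]
        exact pvGetD_append_length P x rs ""
      simp only [hh, if_true, List.singleton_append, pvB_scan, hget]
      by_cases hin : PySem.Str.isIn fp x
      · simp only [hin, if_true]
        have h2 := pvL2 fp rs P [x] (by simp)
        simp only [pvA_loop, hh, hin, Bool.and_self, if_true]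
        simp only [List.append_assoc, List.singleton_append, List.length_append,
          List.length_singleton] at h2 ⊢
        push_cast at h2 ⊢
        exact h2
      · simp only [hin, if_false, Bool.false_eq_true]
        have h2 := ih (P ++ [x])
        simp only [pvA_loop, hh, hin, Bool.and_false, Bool.false_eq_true, if_false]
        simp only [List.append_assoc, List.singleton_append, List.length_append,
          List.length_singleton] at h2 ⊢
        push_cast at h2 ⊢
        exact h2
    · simp only [hh, if_false, Bool.false_eq_true, List.nil_append]
      have h2 := ih (P ++ [x])
      simp only [pvA_loop, hh, Bool.false_and, Bool.false_eq_true, if_false]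
      simp only [List.append_assoc, List.singleton_append, List.length_append,
        List.length_singleton] at h2 ⊢
      push_cast at h2 ⊢
      exact h2

-- ===== VERDICT (by name: the statement is the Claim_ definition above) =====
theorem extract_file_diff_py_spec : Claim_equal_extract_file_diff_py := by
  intro diff_text file_path _
  unfold Spec_extract_file_diff_py extract_file_diff_py extract_file_diff_py_alt
  have h := pvL1 file_path (((PySem.Str.split? diff_text "\n").getD [])) []
  simp only [List.nil_append, List.length_nil, Nat.cast_zero, ← pvB_headers_eq] at h
  set lines := ((PySem.Str.split? diff_text "\n").getD [])
  set r := pvB_scan file_path lines (pvB_headers lines) none (lines.length : Int) with hr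
  rw [← h]
  simp only [← hr]
  cases hs : r.1 with
  | none => simp only [pvOut, hs]; decide
  | some s => simp only [pvOut, hs]
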